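-- pv_equiv track=rewrite | github.com/cinfis1977/final | tools/verdict_group_eval.py | summarize_data_ok
-- ===== SOURCE A (Python) =====
-- def summarize_data_ok(rows):
--     vals = [str(r.get("data_ok", "")).upper() for r in rows]
--     if not vals:
--         return "UNKNOWN"
--     if any(v == "NO" for v in vals):
--         return "NO"
--     if all(v == "YES" for v in vals):
--         return "YES"
--     if all(v == "NO_DATA" for v in vals):
--         return "NO_DATA"
--     if all(v in ("YES", "NO_DATA") for v in vals):
--         return "PARTIAL"
--     return "UNKNOWN"
-- ===== SOURCE B (Python) =====
-- def summarize_data_ok(rows):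
--     if not rows:
--         return "UNKNOWN"
--     saw_no = saw_yes = saw_nd = saw_other = False
--     for r in rows:
--         v = str(r.get("data_ok", "")).upper()
--         if v == "NO":
--             saw_no = True
--         elif v == "YES":
--             saw_yes = True
--         elif v == "NO_DATA":
--             saw_nd = True
--         else:
--             saw_other = True
--     if saw_no:
--         return "NO"
--     if saw_other:
--         return "UNKNOWN"
--     if saw_yes and saw_nd:
--         return "PARTIAL"
--     return "YES" if saw_yes else "NO_DATA"
-- ===== Notes on version B (the rewrite author's own statement) =====
-- stated objective: alternative
-- what changed: Replaces the intermediate vals list and the four separate any/all scans with a single pass over rows that accumulates four category flags, followed by a constant-time decision on those flags.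
import Mathlib
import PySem

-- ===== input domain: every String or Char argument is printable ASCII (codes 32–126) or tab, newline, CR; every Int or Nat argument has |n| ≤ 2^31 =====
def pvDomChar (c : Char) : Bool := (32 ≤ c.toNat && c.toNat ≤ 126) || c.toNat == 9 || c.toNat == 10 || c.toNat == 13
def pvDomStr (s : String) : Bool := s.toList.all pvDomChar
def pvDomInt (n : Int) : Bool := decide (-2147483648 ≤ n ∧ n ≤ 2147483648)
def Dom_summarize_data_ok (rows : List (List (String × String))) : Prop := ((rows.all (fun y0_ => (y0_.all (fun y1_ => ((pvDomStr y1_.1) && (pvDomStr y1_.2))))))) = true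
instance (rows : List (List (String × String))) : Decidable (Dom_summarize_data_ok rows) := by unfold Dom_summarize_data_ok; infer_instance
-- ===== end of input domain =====

-- B replaces A's intermediate vals list and four any/all scans with one flag-accumulating pass
-- over rows plus a constant-time decision; equivalence of the return values is proved below.

-- ===== PORT A =====
-- normalized value of one row: str(r.get("data_ok", "")).upper()
def pvVal (r : List (String × String)) : String :=
  PySem.Str.upper ((PySem.Dict.mk r).getD "data_ok" "")

def summarize_data_ok (rows : List (List (String × String))) : String :=
  let vals := rows.map pvVal
  if vals = [] then "UNKNOWN"
  else if vals.any (fun v => v == "NO") then "NO"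
  else if vals.all (fun v => v == "YES") then "YES"
  else if vals.all (fun v => v == "NO_DATA") then "NO_DATA"
  else if vals.all (fun v => v == "YES" || v == "NO_DATA") then "PARTIAL"
  else "UNKNOWN"

-- ===== PORT B =====
-- one step of B's loop: update the four category flags from one row
def pvStep (s : Bool × Bool × Bool × Bool) (r : List (String × String)) : Bool × Bool × Bool × Bool :=
  let v := pvVal r
  let (no, yes, nd, other) := s
  if v == "NO" then (true, yes, nd, other)
  else if v == "YES" then (no, true, nd, other)
  else if v == "NO_DATA" then (no, yes, true, other)
  else (no, yes, nd, true)

def summarize_data_ok_alt (rows : List (List (String × String))) : String :=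
  if rows = [] then "UNKNOWN"
  else
    let st := rows.foldl pvStep (false, false, false, false)
    let (no, yes, nd, other) := st
    if no then "NO"
    else if other then "UNKNOWN"
    else if yes && nd then "PARTIAL"
    else if yes then "YES"
    else "NO_DATA"

-- ===== PRECONDITION & SPEC =====
def Spec_summarize_data_ok (rows : List (List (String × String))) (out : String) : Prop := out = summarize_data_ok_alt rows
instance (rows : List (List (String × String))) (out : String) : Decidable (Spec_summarize_data_ok rows out) := by unfold Spec_summarize_data_ok; infer_instance

-- ===== CLAIM (what is proved, stated in full; the proofs are below) =====
def Claim_equal_summarize_data_ok : Prop := ∀ (rows : List (List (String × String))), Dom_summarize_data_ok rows → Spec_summarize_data_ok rows (summarize_data_ok rows)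

-- ===== LEMMAS AND PROOFS =====

-- "other" category predicate on a normalized value
def pvO (v : String) : Bool := !(v == "NO" || v == "YES" || v == "NO_DATA")

-- B's fold computes exactly the four 'any' flags over the mapped values
theorem pvFold_char (rows : List (List (String × String))) (no yes nd other : Bool) :
    rows.foldl pvStep (no, yes, nd, other) =
      (no || (rows.map pvVal).any (fun v => v == "NO"),
       yes || (rows.map pvVal).any (fun v => v == "YES"),
       nd || (rows.map pvVal).any (fun v => v == "NO_DATA"),
       other || (rows.map pvVal).any pvO) := by
  induction rows generalizing no yes nd other with
  | nil => simp
  | cons r t ih =>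
    simp only [List.foldl_cons, List.map_cons, List.any_cons]
    rw [pvStep]
    by_cases h1 : pvVal r = "NO"
    · simp [h1, ih, pvO]
    · by_cases h2 : pvVal r = "YES"
      · simp [h2, ih, pvO]
      · by_cases h3 : pvVal r = "NO_DATA"
        · simp [h3, ih, pvO]
        · simp [ih, pvO, beq_eq_false_iff_ne.mpr h1, beq_eq_false_iff_ne.mpr h2,
            beq_eq_false_iff_ne.mpr h3]

-- ===== VERDICT (by name: the statement is the Claim_ definition above) =====

theorem summarize_data_ok_spec : Claim_equal_summarize_data_ok := by
  intro rows _
  unfold Spec_summarize_data_ok summarize_data_ok summarize_data_ok_alt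
  rcases hr : rows with _ | ⟨r0, t⟩
  · simp
  · rw [← hr]
    have hne : rows ≠ [] := by simp [hr]
    simp only [pvFold_char, Bool.false_or, hne, reduceIte]
    set vals := rows.map pvVal with hvals
    have hvne : vals ≠ [] := by simp [hvals, hr]
    simp only [hvne, reduceIte]
    by_cases hN : vals.any (fun v => v == "NO")
    · simp [hN]
    · simp only [hN, Bool.false_eq_true, if_false]
      by_cases hO : vals.any pvO
      · -- an "other" value exists: A fails all three all-tests, B returns UNKNOWN
        obtain ⟨v, hv, hvo⟩ := List.any_eq_true.mp hO
        simp only [pvO, Bool.not_eq_true', Bool.or_eq_false_iff, beq_eq_false_iff_ne] at hvo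
        obtain ⟨⟨-, hy⟩, hd⟩ := hvo
        have h1 : vals.all (fun v => v == "YES") = false :=
          List.all_eq_false.mpr ⟨v, hv, by simp [hy]⟩
        have h2 : vals.all (fun v => v == "NO_DATA") = false :=
          List.all_eq_false.mpr ⟨v, hv, by simp [hd]⟩
        have h3 : vals.all (fun v => v == "YES" || v == "NO_DATA") = false :=
          List.all_eq_false.mpr ⟨v, hv, by simp [hy, hd]⟩
        simp [h1, h2, h3, hO]
      · -- no NO, no other: every value is YES or NO_DATA
        have hall : ∀ v ∈ vals, v = "YES" ∨ v = "NO_DATA" := by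
          intro v hv
          by_cases hy : v = "YES"
          · exact Or.inl hy
          by_cases hd : v = "NO_DATA"
          · exact Or.inr hd
          by_cases hn : v = "NO"
          · exact absurd (List.any_eq_true.mpr ⟨v, hv, by simp [hn]⟩) hN
          · exact absurd (List.any_eq_true.mpr ⟨v, hv, by simp [pvO, hn, hy, hd]⟩) hO
        by_cases hY : vals.any (fun v => v == "YES")
        · by_cases hD : vals.any (fun v => v == "NO_DATA")
          · -- mixed YES and NO_DATA → PARTIAL
            obtain ⟨vy, hvy, hy⟩ := List.any_eq_true.mp hY
            obtain ⟨vd, hvd, hd⟩ := List.any_eq_true.mp hD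
            have h1 : vals.all (fun v => v == "YES") = false := by
              refine List.all_eq_false.mpr ⟨vd, hvd, ?_⟩
              simp at hd; simp [hd]
            have h2 : vals.all (fun v => v == "NO_DATA") = false := by
              refine List.all_eq_false.mpr ⟨vy, hvy, ?_⟩
              simp at hy; simp [hy]
            have h3 : vals.all (fun v => v == "YES" || v == "NO_DATA") = true := by
              refine List.all_eq_true.mpr fun v hv => ?_
              rcases hall v hv with h | h <;> simp [h]
            simp [h1, h2, h3, hO, hY, hD]
          · -- only YES
            have h1 : vals.all (fun v => v == "YES") = true := by
              refine List.all_eq_true.mpr fun v hv => ?_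
              rcases hall v hv with h | h
              · simp [h]
              · exact absurd (List.any_eq_true.mpr ⟨v, hv, by simp [h]⟩) hD
            simp [h1, hO, hY, hD]
        · -- only NO_DATA (vals nonempty, no YES anywhere)
          have h2 : vals.all (fun v => v == "NO_DATA") = true := by
            refine List.all_eq_true.mpr fun v hv => ?_
            rcases hall v hv with h | h
            · exact absurd (List.any_eq_true.mpr ⟨v, hv, by simp [h]⟩) hY
            · simp [h]
          have h1 : vals.all (fun v => v == "YES") = false := by
            rcases hvals' : vals with _ | ⟨v0, t0⟩
            · exact absurd hvals' hvne
            · have h0 := hall v0 (by simp [hvals'])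
              rcases h0 with h | h
              · exact absurd (List.any_eq_true.mpr ⟨v0, by simp [hvals'], by simp [h]⟩) hY
              · refine List.all_eq_false.mpr ⟨v0, by simp, by simp [h]⟩
          simp [h1, h2, hO, hY]
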